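-- pv_equiv track=rewrite | github.com/aim-ctrl/quran-cards | app.py | apply_hifz_markup
-- ===== SOURCE A (Python) =====
-- def apply_hifz_markup(text):
--     words = text.split(" ")
--     colored_words = []
--     for word in words:
--         if word:
--             colored_words.append(f'<span class="h-start">{word[0]}</span>{word[1:]}')
--         else:
--             colored_words.append(word)
--     return " ".join(colored_words)
-- ===== SOURCE B (Python) =====
-- def apply_hifz_markup(text):
--     out = []
--     start = True
--     for ch in text:
--         if ch == " ":
--             out.append(ch)
--             start = True
--         elif start:
--             out.append(f'<span class="h-start">{ch}</span>')
--             start = False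
--         else:
--             out.append(ch)
--     return "".join(out)
-- ===== Notes on version B (the rewrite author's own statement) =====
-- stated objective: alternative
-- what changed: Replaced split-on-space / per-word wrap / rejoin with a single left-to-right scan over the characters that keeps a word-start flag and wraps a character exactly when it is a non-space at the start or after a space.
import Mathlib
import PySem

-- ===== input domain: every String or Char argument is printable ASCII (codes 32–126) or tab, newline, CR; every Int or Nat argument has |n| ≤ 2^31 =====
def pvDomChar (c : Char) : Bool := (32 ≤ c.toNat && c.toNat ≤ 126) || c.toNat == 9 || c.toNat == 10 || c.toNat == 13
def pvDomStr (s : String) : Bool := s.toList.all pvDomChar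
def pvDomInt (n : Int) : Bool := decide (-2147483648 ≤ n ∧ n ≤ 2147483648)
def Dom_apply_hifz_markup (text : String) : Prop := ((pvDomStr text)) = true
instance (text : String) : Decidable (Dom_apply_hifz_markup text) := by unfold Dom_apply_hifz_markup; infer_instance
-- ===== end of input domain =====

-- B replaces split/wrap/rejoin by one left-to-right scan with a word-start flag (alternative decomposition, same cost).

-- ===== PORT A =====
-- colour one word: if word: '<span class="h-start">' + word[0] + '</span>' + word[1:] else: word
-- (word[0] on a nonempty word = take 1; word[1:] = drop 1; exact on List Char)
def pvColorA (w : List Char) : List Char :=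
  if w ≠ [] then "<span class=\"h-start\">".toList ++ List.take 1 w ++ "</span>".toList ++ List.drop 1 w
  else w

def apply_hifz_markup (text : String) : String :=
  let words := PySem.Chars.splitOn text.toList [' ']
  let colored_words := words.foldl (fun acc w => acc ++ [pvColorA w]) []
  String.ofList (PySem.Chars.join [' '] colored_words)

-- ===== PORT B =====
-- one pass; `start` is the word-start flag of Source B's loop
def pvScanB : Bool → List Char → List Char
  | _, [] => []
  | start, c :: rest =>
    if c = ' ' then c :: pvScanB true rest
    else if start then "<span class=\"h-start\">".toList ++ [c] ++ "</span>".toList ++ pvScanB false rest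
    else c :: pvScanB false rest

def apply_hifz_markup_alt (text : String) : String :=
  String.ofList (pvScanB true text.toList)

-- ===== PRECONDITION & SPEC =====
def Spec_apply_hifz_markup (text : String) (out : String) : Prop := out = apply_hifz_markup_alt text
instance (text : String) (out : String) : Decidable (Spec_apply_hifz_markup text out) := by unfold Spec_apply_hifz_markup; infer_instance

-- ===== CLAIM (what is proved, stated in full; the proofs are below) =====
def Claim_equal_apply_hifz_markup : Prop := ∀ (text : String), Dom_apply_hifz_markup text → Spec_apply_hifz_markup text (apply_hifz_markup text)

-- ===== LEMMAS AND PROOFS =====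

/-- Recursive specification of splitting on a single space. -/
def pvSplitRec : List Char → List (List Char)
  | [] => [[]]
  | c :: rest => if c = ' ' then [] :: pvSplitRec rest else (pvSplitRec rest).modifyHead (c :: ·)

lemma pvSplitRec_ne_nil (l : List Char) : pvSplitRec l ≠ [] := by
  induction l with
  | nil => simp [pvSplitRec]
  | cons c rest ih =>
    simp only [pvSplitRec]
    split_ifs
    · simp
    · cases h : pvSplitRec rest with
      | nil => exact absurd h ih
      | cons a b => simp [List.modifyHead]

lemma pvGo_eq (fuel : Nat) : ∀ (l cur : List Char) (accs : List (List Char)),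
    l.length < fuel →
    PySem.Chars.splitOn.go [' '] fuel l cur accs =
      accs.reverse ++ (pvSplitRec l).modifyHead (cur.reverse ++ ·) := by
  induction fuel with
  | zero => intro l cur accs h; omega
  | succ fuel ih =>
    intro l cur accs h
    cases l with
    | nil =>
      rw [PySem.Chars.splitOn.go]
      · simp [pvSplitRec, List.modifyHead]
      · omega
    | cons c rest =>
      rw [PySem.Chars.splitOn.go]
      by_cases hc : c = ' '
      · subst hc
        rw [if_pos (by simp [List.isPrefixOf])]
        rw [ih _ _ _ (by simpa using Nat.lt_of_succ_lt_succ h)]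
        cases hr : pvSplitRec rest with
        | nil => exact absurd hr (pvSplitRec_ne_nil rest)
        | cons a b => simp [pvSplitRec, List.modifyHead, hr]
      · rw [if_neg (by simp [List.isPrefixOf]; intro hh; exact hc hh.symm)]
        rw [ih _ _ _ (by simpa using Nat.lt_of_succ_lt_succ h)]
        cases hr : pvSplitRec rest with
        | nil => simp [pvSplitRec, hc, List.modifyHead, hr]
        | cons a b => simp [pvSplitRec, hc, List.modifyHead, hr]

lemma pvSplitOn_eq (cs : List Char) : PySem.Chars.splitOn cs [' '] = pvSplitRec cs := by
  rw [PySem.Chars.splitOn, pvGo_eq (cs.length + 1) cs [] [] (by omega)]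
  cases hr : pvSplitRec cs with
  | nil => exact absurd hr (pvSplitRec_ne_nil cs)
  | cons a b => simp [List.modifyHead]

lemma pvFoldl_map (f : List Char → List Char) (ws : List (List Char)) (acc : List (List Char)) :
    ws.foldl (fun acc w => acc ++ [f w]) acc = acc ++ ws.map f := by
  induction ws generalizing acc with
  | nil => simp
  | cons w ws ih => simp [List.foldl, ih]

lemma pvJoin_cons_append (p h : List Char) (t : List (List Char)) :
    PySem.Chars.join [' '] ((p ++ h) :: t) = p ++ PySem.Chars.join [' '] (h :: t) := by
  cases t <;> simp [PySem.Chars.join, List.intercalate]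

lemma pvMain (cs : List Char) :
    PySem.Chars.join [' '] ((pvSplitRec cs).map pvColorA) = pvScanB true cs ∧
    (∀ h t, pvSplitRec cs = h :: t →
      PySem.Chars.join [' '] (h :: t.map pvColorA) = pvScanB false cs) := by
  induction cs with
  | nil =>
    refine ⟨by simp [pvSplitRec, pvColorA, pvScanB, PySem.Chars.join, List.intercalate], ?_⟩
    intro h t hht
    simp only [pvSplitRec] at hht
    cases hht
    simp [pvScanB, PySem.Chars.join, List.intercalate]
  | cons c rest ih =>
    obtain ⟨h, t, hr⟩ : ∃ h t, pvSplitRec rest = h :: t := by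
      cases hx : pvSplitRec rest with
      | nil => exact absurd hx (pvSplitRec_ne_nil rest)
      | cons a b => exact ⟨a, b, rfl⟩
    by_cases hc : c = ' '
    · subst hc
      have hsplit : pvSplitRec (' ' :: rest) = [] :: pvSplitRec rest := by
        simp [pvSplitRec]
      have h1 := ih.1
      rw [hr] at h1
      simp only [List.map_cons] at h1
      constructor
      · rw [hsplit, hr]
        simp only [List.map_cons]
        have hce : pvColorA ([] : List Char) = [] := by simp [pvColorA]
        rw [hce]
        have hj : PySem.Chars.join [' '] (([] : List Char) :: pvColorA h :: t.map pvColorA)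
            = ' ' :: PySem.Chars.join [' '] (pvColorA h :: t.map pvColorA) := by
          simp [PySem.Chars.join, List.intercalate]
        rw [hj, h1]
        simp [pvScanB]
      · intro h' t' hht
        rw [hsplit] at hht
        cases hht
        rw [hr]
        simp only [List.map_cons]
        have hj : PySem.Chars.join [' '] (([] : List Char) :: pvColorA h :: t.map pvColorA)
            = ' ' :: PySem.Chars.join [' '] (pvColorA h :: t.map pvColorA) := by
          simp [PySem.Chars.join, List.intercalate]
        rw [hj, h1]
        simp [pvScanB]
    · have hsplit : pvSplitRec (c :: rest) = (c :: h) :: t := by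
        simp only [pvSplitRec, if_neg hc, hr, List.modifyHead]
      have hcolor : pvColorA (c :: h) =
          ("<span class=\"h-start\">".toList ++ [c] ++ "</span>".toList) ++ h := by
        simp [pvColorA]
      constructor
      · rw [hsplit]
        simp only [List.map_cons]
        rw [hcolor, pvJoin_cons_append]
        rw [ih.2 h t hr]
        simp [pvScanB, hc]
      · intro h' t' hht
        rw [hsplit] at hht
        cases hht
        rw [show (c :: h) = [c] ++ h from rfl, pvJoin_cons_append]
        rw [ih.2 h t hr]
        simp [pvScanB, hc]

-- ===== VERDICT (by name: the statement is the Claim_ definition above) =====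
theorem apply_hifz_markup_spec : Claim_equal_apply_hifz_markup := by
  intro text _
  unfold Spec_apply_hifz_markup apply_hifz_markup apply_hifz_markup_alt
  simp only [pvSplitOn_eq, pvFoldl_map, List.nil_append, (pvMain text.toList).1]
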